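-- pv_equiv track=rewrite | github.com/ijight/clustering-blepharospasms | Functions/singlechannel_clustering.py | majority_partition
-- ===== SOURCE A (Python) =====
-- def majority_partition(partition, TS, TIMESTEP, OVERLAP):
--     """
--     Generate majority partition from original timeseries and generated partitions
--
--     Args:
--         partition (list[int]): A list of integers that represent the partition to which each segment in `TS` belongs.
--         TS (list[float]): A time series represented as a list of floats.
--         TIMESTEP (int): The length of each time step.
--         OVERLAP (int): The amount of overlap between consecutive time steps.
--
--     Returns:
--         dict[int, int]: A dictionary where the keys are the time steps of `TS`, and the values are the majority partition for each time step.
--     """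
--     TRUNCATED = len(TS) % TIMESTEP
--     TSFAKE = [*range(len(TS))]
--     SEGMENTSFAKE = [TSFAKE[i:i+TIMESTEP] for i in range(0, len(TS)-TIMESTEP+1, TIMESTEP-OVERLAP)] #(from 0 to last possible timestep, in steps of len of timestep (remove overlap))
--     occuranceTable = {i: [segmentNum for segmentNum in range(len(SEGMENTSFAKE)) if i in SEGMENTSFAKE[segmentNum]] for i in range(len(TS) - TRUNCATED) if any(i in seg for seg in SEGMENTSFAKE)}
--
--     majority_partition = {}
--     # iterate over time steps
--     for i in range(len(TS) - TRUNCATED):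
--         partitions = {} # dictionary to store frequency of partitions in current time step
--
--         # iterate over segments in current time step
--         for segmentNum in occuranceTable[i]:
--             p = partition[segmentNum] # get partition of current segment
--             if p not in partitions:
--                 partitions[p] = 1
--             else:
--                 partitions[p] += 1
--
--         # assign majority partition for current timestep
--         majority = max(partitions, key=partitions.get)
--         majority_partition[i] = majority
--
--     return majority_partition
-- ===== SOURCE B (Python) =====
-- def majority_partition(partition, TS, TIMESTEP, OVERLAP):
--     # Faster: each index's covering segments form a contiguous arithmetic range,
--     # computed directly instead of scanning every segment for membership.
--     result = {}
--     L = len(TS)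
--     if L < TIMESTEP:
--         return result
--     d = TIMESTEP - OVERLAP
--     nseg = (L - TIMESTEP) // d + 1
--     for i in range(L - L % TIMESTEP):
--         kmin = max(0, (i - TIMESTEP + d) // d)
--         kmax = min(i // d, nseg - 1)
--         counts = {}
--         for k in range(kmin, kmax + 1):
--             p = partition[k]
--             counts[p] = counts.get(p, 0) + 1
--         result[i] = max(counts, key=counts.get)
--     return result
-- ===== Notes on version B (the rewrite author's own statement) =====
-- stated objective: faster
-- what changed: A builds an occurrence table by testing every index for membership in every segment list (nested `in` scans); B computes, for each index, the contiguous arithmetic range [kmin, kmax] of covering segments directly from TIMESTEP and the step, and counts only over that range.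
import Mathlib
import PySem

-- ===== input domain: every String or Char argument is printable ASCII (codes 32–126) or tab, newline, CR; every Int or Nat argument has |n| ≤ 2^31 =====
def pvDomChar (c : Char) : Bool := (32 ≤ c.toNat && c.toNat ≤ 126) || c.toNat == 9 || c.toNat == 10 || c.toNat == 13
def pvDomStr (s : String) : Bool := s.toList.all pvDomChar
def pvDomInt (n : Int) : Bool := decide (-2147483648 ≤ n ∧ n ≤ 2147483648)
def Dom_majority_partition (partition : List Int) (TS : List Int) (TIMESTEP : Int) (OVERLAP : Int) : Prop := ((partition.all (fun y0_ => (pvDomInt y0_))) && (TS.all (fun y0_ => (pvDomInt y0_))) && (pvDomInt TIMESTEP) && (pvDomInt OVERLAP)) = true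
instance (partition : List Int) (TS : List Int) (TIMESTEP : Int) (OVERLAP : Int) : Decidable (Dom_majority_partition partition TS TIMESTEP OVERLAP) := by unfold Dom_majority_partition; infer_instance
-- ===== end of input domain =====

-- B replaces A's per-index membership scan over all segments (via an occurrence table built
-- by nested `in` tests) with a direct arithmetic computation of the contiguous range of
-- segments covering each index; objective: faster.

-- ===== PORT A =====
def majority_partition (partition : List Int) (TS : List Int) (TIMESTEP : Int) (OVERLAP : Int) : List (Int × Int) :=
  let L : Int := TS.length
  let TRUNCATED := PySem.Int.mod L TIMESTEP
  let TSFAKE := PySem.List.pyRange 0 L 1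
  let SEGMENTSFAKE := (PySem.List.pyRange 0 (L - TIMESTEP + 1) (TIMESTEP - OVERLAP)).map
      (fun i => PySem.List.slice TSFAKE (some i) (some (i + TIMESTEP)))
  let occuranceTable : PySem.Dict Int (List Int) :=
    ((PySem.List.pyRange 0 (L - TRUNCATED) 1).filter
        (fun i => SEGMENTSFAKE.any (fun seg => seg.contains i))).foldl
      (fun d i => d.insert i ((PySem.List.pyRange 0 (SEGMENTSFAKE.length : Int) 1).filter
          (fun n => (PySem.List.pyGetD SEGMENTSFAKE n []).contains i))) PySem.Dict.empty
  let mp : PySem.Dict Int Int :=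
    (PySem.List.pyRange 0 (L - TRUNCATED) 1).foldl
      (fun mp i =>
        -- occuranceTable[i]: KeyError where absent — excluded by Pre_
        let occ := occuranceTable.getD i []
        let partitions : PySem.Dict Int Int := occ.foldl
          (fun ps k =>
            -- partition[segmentNum]: IndexError where out of range — excluded by Pre_
            let p := PySem.List.pyGetD partition k 0
            if ps.contains p then ps.modify p 0 (· + 1) else ps.insert p 1) PySem.Dict.empty
        -- max(partitions, key=partitions.get); raises on empty dict — excluded by Pre_
        let majority := (PySem.List.max? partitions.keys (fun k => partitions.getD k 0)).getD 0
        mp.insert i majority) PySem.Dict.empty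
  mp.items

-- ===== PORT B =====
def majority_partition_alt (partition : List Int) (TS : List Int) (TIMESTEP : Int) (OVERLAP : Int) : List (Int × Int) :=
  let L : Int := TS.length
  if L < TIMESTEP then ([] : List (Int × Int))
  else
    let d := TIMESTEP - OVERLAP
    let nseg := PySem.Int.floordiv (L - TIMESTEP) d + 1
    let res : PySem.Dict Int Int :=
      (PySem.List.pyRange 0 (L - PySem.Int.mod L TIMESTEP) 1).foldl
        (fun res i =>
          let kmin := max 0 (PySem.Int.floordiv (i - TIMESTEP + d) d)
          let kmax := min (PySem.Int.floordiv i d) (nseg - 1)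
          let counts : PySem.Dict Int Int :=
            (PySem.List.pyRange kmin (kmax + 1) 1).foldl
              (fun c k =>
                let p := PySem.List.pyGetD partition k 0
                c.insert p (c.getD p 0 + 1)) PySem.Dict.empty
          res.insert i ((PySem.List.max? counts.keys (fun k => counts.getD k 0)).getD 0)) PySem.Dict.empty
    res.items

-- ===== PRECONDITION & SPEC =====
-- Pre_ holds exactly where Python A returns normally; it excludes only inputs where A raises:
-- TIMESTEP = 0 (ZeroDivisionError), step TIMESTEP-OVERLAP = 0 (ValueError in range), timesteps
-- not covered by any segment (KeyError in occuranceTable), and partition shorter than the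
-- number of segments (IndexError).
def Pre_majority_partition (partition : List Int) (TS : List Int) (TIMESTEP : Int) (OVERLAP : Int) : Prop :=
  (1 ≤ TIMESTEP ∧
    (((TS.length : Int) < TIMESTEP ∧ OVERLAP ≠ TIMESTEP) ∨
     (TIMESTEP ≤ (TS.length : Int) ∧ 1 ≤ TIMESTEP - OVERLAP ∧
      (PySem.Int.floordiv ((TS.length : Int) - TIMESTEP) (TIMESTEP - OVERLAP) + 1 ≤ 1 ∨
        TIMESTEP - OVERLAP ≤ TIMESTEP) ∧
      (TS.length : Int) - PySem.Int.mod (TS.length : Int) TIMESTEP ≤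
        PySem.Int.floordiv ((TS.length : Int) - TIMESTEP) (TIMESTEP - OVERLAP) * (TIMESTEP - OVERLAP) + TIMESTEP ∧
      PySem.Int.floordiv ((TS.length : Int) - TIMESTEP) (TIMESTEP - OVERLAP) + 1 ≤ (partition.length : Int))))
  ∨ (TS = [] ∧ TIMESTEP ≤ -1 ∧ OVERLAP ≠ TIMESTEP)
instance (partition : List Int) (TS : List Int) (TIMESTEP : Int) (OVERLAP : Int) : Decidable (Pre_majority_partition partition TS TIMESTEP OVERLAP) := by unfold Pre_majority_partition; infer_instance

def pvWitness_majority_partition : List Int × List Int × Int × Int := ([0, 1, 0], [0, 1, 2, 3, 4, 5], 3, 0)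

def Spec_majority_partition (partition : List Int) (TS : List Int) (TIMESTEP : Int) (OVERLAP : Int) (out : List (Int × Int)) : Prop := out = majority_partition_alt partition TS TIMESTEP OVERLAP
instance (partition : List Int) (TS : List Int) (TIMESTEP : Int) (OVERLAP : Int) (out : List (Int × Int)) : Decidable (Spec_majority_partition partition TS TIMESTEP OVERLAP out) := by unfold Spec_majority_partition; infer_instance

-- ===== CLAIM (what is proved, stated in full; the proofs are below) =====
def Claim_equal_majority_partition : Prop := ∀ (partition : List Int) (TS : List Int) (TIMESTEP : Int) (OVERLAP : Int), Dom_majority_partition partition TS TIMESTEP OVERLAP → Pre_majority_partition partition TS TIMESTEP OVERLAP → Spec_majority_partition partition TS TIMESTEP OVERLAP (majority_partition partition TS TIMESTEP OVERLAP)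

-- ===== LEMMAS AND PROOFS =====

-- Python's counting loop `if p not in d: d[p]=1 else d[p]+=1` equals `d[p] = d.get(p,0)+1` stepwise.
theorem pvCountStep (ps : PySem.Dict Int Int) (p : Int) :
    (if ps.contains p then ps.modify p 0 (· + 1) else ps.insert p 1) =
      ps.insert p (ps.getD p 0 + 1) := by
  by_cases h : ps.contains p = true
  · simp [h, PySem.Dict.modify]
  · have h' : ps.contains p = false := by simpa using h
    rw [if_neg h, PySem.Dict.getD_of_not_contains _ _ h']
    norm_num

theorem pvCountFoldEq (f : Int → Int) (l : List Int) (ps : PySem.Dict Int Int) :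
    l.foldl (fun ps k => if ps.contains (f k) then ps.modify (f k) 0 (· + 1) else ps.insert (f k) 1) ps =
      l.foldl (fun c k => c.insert (f k) (c.getD (f k) 0 + 1)) ps := by
  simp only [pvCountStep]

-- two strictly increasing Int lists with the same members are equal
theorem pvSortedMemEq (l1 l2 : List Int) (h1 : l1.Pairwise (· < ·)) (h2 : l2.Pairwise (· < ·))
    (hm : ∀ x, x ∈ l1 ↔ x ∈ l2) : l1 = l2 := by
  have n1 : l1.Nodup := h1.imp ne_of_lt
  have n2 : l2.Nodup := h2.imp ne_of_lt
  have hp : l1.Perm l2 := (List.perm_ext_iff_of_nodup n1 n2).2 hm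
  exact List.eq_of_perm_of_sorted (fun a b _ _ hab hba => absurd hba (not_lt.2 hab.le)) h1 h2 hp

-- a slice of range(L) is a range
theorem pvSlicePyRange (L s e : Int) (hs : 0 ≤ s) (hse : s ≤ e) (heL : e ≤ L) :
    PySem.List.slice (PySem.List.pyRange 0 L 1) (some s) (some e) = PySem.List.pyRange s e 1 := by
  obtain ⟨a, rfl⟩ : ∃ a : Nat, s = (a : Int) := ⟨s.toNat, (Int.toNat_of_nonneg hs).symm⟩
  obtain ⟨b, rfl⟩ : ∃ b : Nat, e = (b : Int) := ⟨e.toNat, (Int.toNat_of_nonneg (hs.trans hse)).symm⟩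
  rw [PySem.List.slice_natCast]
  apply List.ext_getElem
  · simp only [List.length_take, List.length_drop, PySem.List.length_pyRange_one]
    omega
  · intro j h1 h2
    simp only [List.getElem_take, List.getElem_drop, PySem.List.getElem_pyRange_one]
    push_cast
    ring

-- lookup in a dict built by inserting distinct fresh keys
theorem pvGetDTable (xs : List Int) (g : Int → List Int) (hx : xs.Nodup) (i : Int) (hi : i ∈ xs) :
    (xs.foldl (fun d i => d.insert i (g i)) PySem.Dict.empty).getD i [] = g i := by
  have hitems := PySem.Dict.items_foldl_insert_fresh xs (fun i => i) g PySem.Dict.empty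
    (by intro a _; simp) (by simpa using hx)
  have hemp : (PySem.Dict.empty : PySem.Dict Int (List Int)).items = [] := rfl
  apply PySem.Dict.getD_of_mem_items
  · rw [hitems, hemp]
    simp only [List.nil_append, List.mem_map]
    exact ⟨i, hi, rfl⟩
  · simp only [PySem.Dict.keys, hitems, hemp, List.nil_append, List.map_map]
    have hcomp : ((fun x : Int × List Int => x.1) ∘ fun a : Int => (a, g a)) = fun a : Int => a := by
      funext a; rfl
    rw [hcomp]
    simpa using hx

-- items of a dict built by inserting distinct fresh keys is the corresponding map
theorem pvItemsMap (xs : List Int) (v : Int → Int) (hx : xs.Nodup) :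
    (xs.foldl (fun d i => d.insert i (v i)) PySem.Dict.empty).items = xs.map (fun i => (i, v i)) := by
  have hitems := PySem.Dict.items_foldl_insert_fresh xs (fun i => i) v PySem.Dict.empty
    (by intro a _; simp) (by simpa using hx)
  simpa [show (PySem.Dict.empty : PySem.Dict Int Int).items = [] from rfl] using hitems

-- ===== VERDICT (by name: the statement is the Claim_ definition above) =====
theorem majority_partition_spec : Claim_equal_majority_partition := by
  intro partition TS T O _hDom hPre
  unfold Spec_majority_partition
  show majority_partition partition TS T O = majority_partition_alt partition TS T O
  rcases hPre with ⟨hT1, hcase⟩ | ⟨hnil, hTneg, _hOne⟩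
  · rcases hcase with ⟨hLT, _hOne⟩ | ⟨hTL, hd1, hp1, hp2, _hp3⟩
    · -- len(TS) < TIMESTEP : both return []
      have hL0 : (0 : Int) ≤ (TS.length : Int) := Int.natCast_nonneg _
      have hTR : PySem.Int.mod (TS.length : Int) T = (TS.length : Int) := by
        rw [PySem.Int.mod_eq_emod_of_pos (by omega)]
        exact Int.emod_eq_of_lt hL0 hLT
      simp only [majority_partition, majority_partition_alt, hTR, sub_self, if_pos hLT,
        PySem.List.pyRange_zero, Int.toNat_zero, List.range_zero, List.map_nil,
        List.filter_nil, List.foldl_nil]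
      rfl
    · -- TIMESTEP ≤ len(TS) : the main case
      simp only [majority_partition, majority_partition_alt, add_sub_cancel_right]
      set L : Int := (TS.length : Int) with hLdef
      have hL0 : (0 : Int) ≤ L := Int.natCast_nonneg _
      rw [if_neg (not_lt.2 hTL)]
      set d : Int := T - O with hddef
      set M : Int := PySem.Int.mod L T with hMdef
      set Q : Int := PySem.Int.floordiv (L - T) d with hQdef
      clear_value L d M Q
      have hT : (0 : Int) < T := by omega
      have hd : (0 : Int) < d := by omega
      have hM0 : 0 ≤ M := by rw [hMdef]; exact PySem.Int.mod_nonneg _ hT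
      have hQ0 : 0 ≤ Q := by
        rw [hQdef]
        exact (PySem.Int.le_floordiv_iff_mul_le hd).2 (by rw [zero_mul]; omega)
      have hQd : Q * d ≤ L - T := by
        rw [hQdef]; exact (PySem.Int.le_floordiv_iff_mul_le hd).1 (by rw [← hQdef])
      -- starts of segments
      have hstarts : PySem.List.pyRange 0 (L - T + 1) d =
          List.map (fun k : Nat => d * (k : Int)) (List.range (Q + 1).toNat) := by
        rw [PySem.List.pyRange_of_pos _ _ hd, if_pos (by omega : (0:Int) < L - T + 1)]
        have harg : L - T + 1 - 0 + d - 1 = (L - T) + 1 * d := by ring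
        rw [harg, Int.add_mul_ediv_right _ _ (by omega : d ≠ 0)]
        rw [show (L - T) / d = Q from by rw [hQdef, PySem.Int.floordiv_eq_ediv_of_pos hd]]
        simp only [zero_add]
      -- each segment is a contiguous range
      have hseg : ∀ n : Int, 0 ≤ n → n ≤ Q →
          PySem.List.pyGetD
            ((PySem.List.pyRange 0 (L - T + 1) d).map
              (fun s => PySem.List.slice (PySem.List.pyRange 0 L 1) (some s) (some (s + T)))) n []
            = PySem.List.pyRange (d * n) (d * n + T) 1 := by
        intro n h0 hQn
        have hlenN : (((PySem.List.pyRange 0 (L - T + 1) d).map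
            (fun s => PySem.List.slice (PySem.List.pyRange 0 L 1) (some s) (some (s + T))))).length
            = (Q + 1).toNat := by
          rw [hstarts]; simp only [List.length_map, List.length_range]
        rw [PySem.List.pyGetD_eq_getElem _ _ h0 (by rw [hlenN]; omega)]
        simp only [hstarts, List.getElem_map, List.getElem_range]
        rw [Int.toNat_of_nonneg h0]
        have hdn : d * n ≤ d * Q := mul_le_mul_of_nonneg_left hQn hd.le
        exact pvSlicePyRange L (d * n) (d * n + T) (mul_nonneg hd.le h0) (by omega)
          (by have := mul_comm Q d; linarith)
      have hlenI : ((((PySem.List.pyRange 0 (L - T + 1) d).map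
            (fun s => PySem.List.slice (PySem.List.pyRange 0 L 1) (some s) (some (s + T))))).length : Int)
          = Q + 1 := by
        rw [hstarts]; simp only [List.length_map, List.length_range]; omega
      rw [hlenI]
      -- both sides are maps over the same index range
      rw [pvItemsMap _ _ (PySem.List.nodup_pyRange_one _ _),
          pvItemsMap _ _ (PySem.List.nodup_pyRange_one _ _)]
      apply List.map_congr_left
      intro i hi
      rw [PySem.List.mem_pyRange_one] at hi
      obtain ⟨hi0, hi1⟩ := hi
      -- arithmetic: the covering segments of index i form the range [kmin, kmax]
      set kmin : Int := max 0 (PySem.Int.floordiv (i - T + d) d) with hkmindef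
      set kmax : Int := min (PySem.Int.floordiv i d) Q with hkmaxdef
      clear_value kmin kmax
      have hfd0 : 0 ≤ PySem.Int.floordiv i d :=
        (PySem.Int.le_floordiv_iff_mul_le hd).2 (by rw [zero_mul]; omega)
      have hkmax0 : 0 ≤ kmax := by rw [hkmaxdef]; exact le_min hfd0 hQ0
      have hkmaxQ : kmax ≤ Q := by rw [hkmaxdef]; exact min_le_right _ _
      have hkfd : kmax ≤ PySem.Int.floordiv i d := by rw [hkmaxdef]; exact min_le_left _ _
      have hcov1 : d * kmax ≤ i := by
        have h1 : kmax * d ≤ i := (PySem.Int.le_floordiv_iff_mul_le hd).1 hkfd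
        have := mul_comm kmax d; linarith
      have hidlt : i < PySem.Int.floordiv i d * d + d := by
        have h1 : i < (PySem.Int.floordiv i d + 1) * d :=
          (PySem.Int.floordiv_lt_iff_lt_mul hd).1 (lt_add_one _)
        have h2 : (PySem.Int.floordiv i d + 1) * d = PySem.Int.floordiv i d * d + d := by ring
        linarith
      have hcov2 : i < d * kmax + T := by
        rcases le_or_gt (PySem.Int.floordiv i d) Q with hle | hgt
        · have hk : kmax = PySem.Int.floordiv i d := by rw [hkmaxdef, min_eq_left hle]
          rcases hp1 with hns | hdT
          · have hQz : Q = 0 := by omega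
            have hkz : kmax = 0 := by omega
            rw [hkz]
            have : Q * d = 0 := by rw [hQz, zero_mul]
            linarith
          · rw [hk]
            have := mul_comm d (PySem.Int.floordiv i d)
            linarith
        · have hk : kmax = Q := by rw [hkmaxdef, min_eq_right hgt.le]
          rw [hk]
          have := mul_comm d Q
          linarith
      have hkminmax : kmin ≤ kmax := by
        rw [hkmindef]
        apply max_le hkmax0
        have h3 : i - T + d < (kmax + 1) * d := by
          have e : (kmax + 1) * d = d * kmax + d := by ring
          linarith
        have := (PySem.Int.floordiv_lt_iff_lt_mul hd).2 h3
        omega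
      have hiff : ∀ n : Int, 0 ≤ n → n ≤ Q →
          ((d * n ≤ i ∧ i < d * n + T) ↔ (kmin ≤ n ∧ n < kmax + 1)) := by
        intro n h0 hQn
        constructor
        · rintro ⟨ha, hb⟩
          constructor
          · rw [hkmindef]
            apply max_le h0
            have h3 : i - T + d < (n + 1) * d := by
              have e : (n + 1) * d = d * n + d := by ring
              linarith
            have := (PySem.Int.floordiv_lt_iff_lt_mul hd).2 h3
            omega
          · have hnd : n * d ≤ i := by have := mul_comm n d; linarith
            have h4 : n ≤ PySem.Int.floordiv i d := (PySem.Int.le_floordiv_iff_mul_le hd).2 hnd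
            have : n ≤ kmax := by rw [hkmaxdef]; exact le_min h4 hQn
            omega
        · rintro ⟨ha, hb⟩
          have h4 : n ≤ PySem.Int.floordiv i d := le_trans (by omega) hkfd
          have h5 : n * d ≤ i := (PySem.Int.le_floordiv_iff_mul_le hd).1 h4
          have h6 : PySem.Int.floordiv (i - T + d) d < n + 1 := by
            have ha' : max 0 (PySem.Int.floordiv (i - T + d) d) ≤ n := by rw [← hkmindef]; exact ha
            have := le_trans (le_max_right 0 (PySem.Int.floordiv (i - T + d) d)) ha'
            omega
          have h8 : i - T + d < (n + 1) * d := (PySem.Int.floordiv_lt_iff_lt_mul hd).1 h6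
          have e : (n + 1) * d = d * n + d := by ring
          constructor
          · have := mul_comm n d; linarith
          · linarith
      -- the occurrence-table lookup
      have hcond : (((PySem.List.pyRange 0 (L - T + 1) d).map
            (fun s => PySem.List.slice (PySem.List.pyRange 0 L 1) (some s) (some (s + T)))).any
              (fun seg => seg.contains i)) = true := by
        have hend : d * kmax + T ≤ L := by
          have h1 : d * kmax ≤ d * Q := mul_le_mul_of_nonneg_left hkmaxQ hd.le
          have h2 := mul_comm Q d
          linarith
        rw [List.any_eq_true]
        refine ⟨PySem.List.slice (PySem.List.pyRange 0 L 1) (some (d * kmax)) (some (d * kmax + T)),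
          ?_, ?_⟩
        · apply List.mem_map.2
          refine ⟨d * kmax, ?_, rfl⟩
          rw [hstarts]
          exact List.mem_map.2 ⟨kmax.toNat, List.mem_range.2 (by omega),
            by rw [Int.toNat_of_nonneg hkmax0]⟩
        · rw [pvSlicePyRange L _ _ (mul_nonneg hd.le hkmax0) (by omega) hend,
            List.contains_iff_mem, PySem.List.mem_pyRange_one]
          exact ⟨hcov1, hcov2⟩
      have hmemfil : i ∈ (PySem.List.pyRange 0 (L - M) 1).filter
          (fun j => ((PySem.List.pyRange 0 (L - T + 1) d).map
            (fun s => PySem.List.slice (PySem.List.pyRange 0 L 1) (some s) (some (s + T)))).any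
              (fun seg => seg.contains j)) := by
        rw [List.mem_filter]
        exact ⟨PySem.List.mem_pyRange_one.2 ⟨hi0, hi1⟩, hcond⟩
      have htable :
          (((PySem.List.pyRange 0 (L - M) 1).filter
            (fun j => ((PySem.List.pyRange 0 (L - T + 1) d).map
              (fun s => PySem.List.slice (PySem.List.pyRange 0 L 1) (some s) (some (s + T)))).any
                (fun seg => seg.contains j))).foldl
            (fun dd j => dd.insert j ((PySem.List.pyRange 0 (Q + 1) 1).filter
              (fun n => (PySem.List.pyGetD
                ((PySem.List.pyRange 0 (L - T + 1) d).map
                  (fun s => PySem.List.slice (PySem.List.pyRange 0 L 1) (some s) (some (s + T)))) n []).contains j)))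
            PySem.Dict.empty).getD i []
          = PySem.List.pyRange kmin (kmax + 1) 1 := by
        rw [pvGetDTable _ _ ((PySem.List.nodup_pyRange_one _ _).filter _) i hmemfil]
        apply pvSortedMemEq
        · exact (PySem.List.pairwise_lt_pyRange_one _ _).filter _
        · exact PySem.List.pairwise_lt_pyRange_one _ _
        · intro x
          rw [List.mem_filter, PySem.List.mem_pyRange_one, PySem.List.mem_pyRange_one]
          constructor
          · rintro ⟨⟨hx0, hx1⟩, hpred⟩
            have hxQ : x ≤ Q := by omega
            rw [hseg x hx0 hxQ, List.contains_iff_mem, PySem.List.mem_pyRange_one] at hpred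
            exact (hiff x hx0 hxQ).1 hpred
          · rintro ⟨ha, hb⟩
            have hkmin0 : (0 : Int) ≤ kmin := by rw [hkmindef]; exact le_max_left _ _
            have hx0 : 0 ≤ x := le_trans hkmin0 ha
            have hxQ : x ≤ Q := by omega
            refine ⟨⟨hx0, by omega⟩, ?_⟩
            rw [hseg x hx0 hxQ, List.contains_iff_mem, PySem.List.mem_pyRange_one]
            exact (hiff x hx0 hxQ).2 ⟨ha, hb⟩
      rw [htable, pvCountFoldEq (fun k => PySem.List.pyGetD partition k 0)]
  · -- TS = [] with TIMESTEP ≤ -1 : both return []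
    subst hnil
    have hm0 : PySem.Int.mod 0 T = 0 := by
      simp [PySem.Int.mod]
    simp only [majority_partition, majority_partition_alt, List.length_nil, Nat.cast_zero, hm0,
      sub_zero, PySem.List.pyRange_zero, Int.toNat_zero, List.range_zero, List.map_nil,
      List.filter_nil, List.foldl_nil]
    rw [if_neg (by omega : ¬ ((0 : Int) < T))]
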